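-- pv_equiv track=rewrite | github.com/vvrmahendra/DS-AlgoPrac | twoPointers/strength.py | solve
-- ===== SOURCE A (Python) =====
-- def solve(A, B, C, D):
--     B = [C-i for i in B]
--     n = len(A)
--     ans = 0
--
--     for i in range(n):
--         l1, r1 = 0, 0
--         l2, r2 = i, i
--         temp = 0
--         flag = True
--         while r1 < n and r2 < n:
--             if flag:
--                 temp += 1 if A[r1] == B[r2] else 0
--             else:
--                 temp -= 1 if A[l1-1] == B[l2-1] else 0
--
--             if temp <= D:
--                 flag = True
--                 ans += r2-l2+1
--                 r1 += 1
--                 r2 += 1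
--             else:
--                 flag = False
--                 l1 += 1
--                 l2 += 1
--
--
--     A, B = B, A
--
--     for i in range(1,n):
--         l1, r1 = 0, 0
--         l2, r2 = i, i
--         temp = 0
--         flag = True
--         while r1 < n and r2 < n:
--             if flag:
--                 temp += 1 if A[r1] == B[r2] else 0
--             else:
--                 temp -= 1 if A[l1-1] == B[l2-1] else 0
--
--             if temp <= D:
--                 flag = True
--                 ans += r2-l2+1
--                 r1 += 1
--                 r2 += 1
--             else:
--                 flag = False
--                 l1 += 1
--                 l2 += 1
--     return ans
-- ===== SOURCE B (Python) =====
-- def solve(A, B, C, D):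
--     # Equivalence is about the return value; unlike A, B does not rebind its local B
--     # (A's rebinding is invisible to the caller anyway).
--     n = len(A)
--     Bt = [C - x for x in B]
--
--     def count_diag(X, Y, start):
--         L = n - start
--         # prefix sums of the per-position match indicators on this diagonal
--         P = [0]
--         for p in range(L):
--             P.append(P[-1] + (1 if X[p] == Y[start + p] else 0))
--         total = 0
--         for r in range(L):
--             # number of l in [0, r] with P[r+1]-P[l] <= D, i.e. first l with
--             # P[l] >= P[r+1]-D (P is non-decreasing), found by binary search
--             target = P[r + 1] - D
--             lo, hi = 0, r + 1
--             while lo < hi: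
--                 mid = (lo + hi) // 2
--                 if P[mid] < target:
--                     lo = mid + 1
--                 else:
--                     hi = mid
--             total += (r + 1) - lo
--         return total
--
--     ans = 0
--     for i in range(n):
--         ans += count_diag(A, Bt, i)
--     for i in range(1, n):
--         ans += count_diag(Bt, A, i)
--     return ans
-- ===== Notes on version B (the rewrite author's own statement) =====
-- stated objective: alternative
-- what changed: Replaces A's flag-based incremental two-pointer over each diagonal with an explicit prefix-sum table of the match indicators plus a hand-written binary search per right endpoint (count = r+1 - bisect_left(P, P[r+1]-D)).
import Mathlib
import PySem

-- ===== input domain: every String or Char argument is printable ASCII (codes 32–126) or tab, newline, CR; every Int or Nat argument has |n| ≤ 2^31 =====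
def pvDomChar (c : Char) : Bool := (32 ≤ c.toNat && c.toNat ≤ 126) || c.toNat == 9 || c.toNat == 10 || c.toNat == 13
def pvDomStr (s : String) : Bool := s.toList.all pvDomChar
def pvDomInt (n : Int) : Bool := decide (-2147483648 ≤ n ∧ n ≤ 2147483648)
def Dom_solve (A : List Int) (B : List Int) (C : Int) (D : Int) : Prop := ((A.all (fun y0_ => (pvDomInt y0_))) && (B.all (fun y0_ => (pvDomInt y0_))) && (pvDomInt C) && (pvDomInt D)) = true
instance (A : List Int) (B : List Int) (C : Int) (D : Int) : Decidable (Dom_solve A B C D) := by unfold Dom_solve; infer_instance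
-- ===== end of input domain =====

-- B replaces A's flag-based incremental two-pointer over each diagonal by an explicit
-- prefix-sum table plus a binary search per right endpoint (objective: alternative; A
-- rebinds only its own local variable B, so there is no caller-visible mutation).

-- ===== PORT A =====

-- 0/1 match indicator; `none` is where Python raises IndexError (excluded by Pre_),
-- the 0 default there is never reached under Pre_.
def pvMatch (X Y : List Int) (i j : Int) : Int :=
  match PySem.List.pyGet? X i, PySem.List.pyGet? Y j with
  | some a, some b => if a = b then 1 else 0
  | _, _ => 0

-- the while loop of A, state (l1, r1, l2, r2, temp, flag, ans); fuel only makes the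
-- recursion structural: 4*len(A)+4 is enough for every input on which Python terminates
def whileA (X Y : List Int) (n D : Int) : Nat → Int → Int → Int → Int → Int → Bool → Int → Int
  | 0, _, _, _, _, _, _, ans => ans
  | fuel+1, l1, r1, l2, r2, temp, flag, ans =>
    if r1 < n ∧ r2 < n then
      let temp' := if flag then temp + pvMatch X Y r1 r2 else temp - pvMatch X Y (l1 - 1) (l2 - 1)
      if temp' ≤ D then
        whileA X Y n D fuel l1 (r1 + 1) l2 (r2 + 1) temp' true (ans + (r2 - l2 + 1))
      else
        whileA X Y n D fuel (l1 + 1) r1 (l2 + 1) r2 temp' false ans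
    else ans

def solve (A : List Int) (B : List Int) (C : Int) (D : Int) : Int :=
  let B' := B.map (fun i => C - i)
  let n : Int := (A.length : Int)
  let fuel := 4 * A.length + 4
  let ans1 := (PySem.List.pyRange 0 n 1).foldl (fun ans i => whileA A B' n D fuel 0 0 i i 0 true ans) 0
  (PySem.List.pyRange 1 n 1).foldl (fun ans i => whileA B' A n D fuel 0 0 i i 0 true ans) ans1

-- ===== PORT B =====

-- P = [0]; for p in range(L): P.append(P[-1] + (1 if X[p]==Y[s+p] else 0))
def pvPrefix (X Y : List Int) (s L : Int) : List Int :=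
  (PySem.List.pyRange 0 L 1).foldl
    (fun P p => P ++ [PySem.List.pyGetD P (-1) 0 + pvMatch X Y p (s + p)]) [0]

-- hand-written binary search of Source B (fuel r+2 ≥ the ≤ hi-lo iterations Python makes)
def pvBisect (P : List Int) (target : Int) : Nat → Int → Int → Int
  | 0, lo, _ => lo
  | fuel+1, lo, hi =>
    if lo < hi then
      let mid := PySem.Int.floordiv (lo + hi) 2
      if PySem.List.pyGetD P mid 0 < target then pvBisect P target fuel (mid + 1) hi
      else pvBisect P target fuel lo mid
    else lo

def countDiag (X Y : List Int) (D n s : Int) : Int :=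
  let L := n - s
  let P := pvPrefix X Y s L
  (PySem.List.pyRange 0 L 1).foldl
    (fun total r =>
      let target := PySem.List.pyGetD P (r + 1) 0 - D
      let lo := pvBisect P target (r + 2).toNat 0 (r + 1)
      total + ((r + 1) - lo)) 0

def solve_alt (A : List Int) (B : List Int) (C : Int) (D : Int) : Int :=
  let n : Int := (A.length : Int)
  let Bt := B.map (fun x => C - x)
  let ans1 := (PySem.List.pyRange 0 n 1).foldl (fun ans i => ans + countDiag A Bt D n i) 0
  (PySem.List.pyRange 1 n 1).foldl (fun ans i => ans + countDiag Bt A D n i) ans1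

-- ===== PRECONDITION & SPEC =====

-- Pre_ excludes exactly the inputs on which Python A raises IndexError: len(B) < len(A)
-- (the first loop indexes B up to len(A)-1), and D < 0 with A nonempty (the shrinking
-- pointer walks past the end of the list before temp can ever reach a negative D).
def Pre_solve (A : List Int) (B : List Int) (C : Int) (D : Int) : Prop :=
  A.length ≤ B.length ∧ (0 ≤ D ∨ A = [])
instance (A : List Int) (B : List Int) (C : Int) (D : Int) : Decidable (Pre_solve A B C D) := by unfold Pre_solve; infer_instance

def pvWitness_solve : List Int × List Int × Int × Int := ([1, 2], [3, 1], 3, 1)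

def Spec_solve (A : List Int) (B : List Int) (C : Int) (D : Int) (out : Int) : Prop := out = solve_alt A B C D
instance (A : List Int) (B : List Int) (C : Int) (D : Int) (out : Int) : Decidable (Spec_solve A B C D out) := by unfold Spec_solve; infer_instance

-- ===== CLAIM (what is proved, stated in full; the proofs are below) =====
def Claim_equal_solve : Prop := ∀ (A : List Int) (B : List Int) (C : Int) (D : Int), Dom_solve A B C D → Pre_solve A B C D → Spec_solve A B C D (solve A B C D)

-- ===== LEMMAS AND PROOFS =====

-- prefix sums of the 0/1 match indicators of one diagonal (offset s)
def prefm (X Y : List Int) (s : Nat) : Nat → Int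
  | 0 => 0
  | k+1 => prefm X Y s k + pvMatch X Y (k : Int) ((s : Int) + (k : Int))

-- number of valid left endpoints for right endpoint r on diagonal s
def cntr (X Y : List Int) (s : Nat) (D : Int) (r : Nat) : Nat :=
  (List.range (r+1)).countP (fun l => decide (prefm X Y s (r+1) - prefm X Y s l ≤ D))

def diagSpec (X Y : List Int) (s : Nat) (D : Int) (L : Nat) : Int :=
  ((List.range L).map (fun r => (cntr X Y s D r : Int))).sum

def tailCnt (X Y : List Int) (s : Nat) (D : Int) (L r : Nat) : Int :=
  ((List.range (L - r)).map (fun t => (cntr X Y s D (r + t) : Int))).sum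

theorem pvMatch_nonneg (X Y : List Int) (i j : Int) : 0 ≤ pvMatch X Y i j := by
  unfold pvMatch
  cases PySem.List.pyGet? X i <;> cases PySem.List.pyGet? Y j <;> simp
  split <;> simp

theorem prefm_le_succ (X Y : List Int) (s k : Nat) :
    prefm X Y s k ≤ prefm X Y s (k+1) := by
  have h := pvMatch_nonneg X Y (k : Int) ((s : Int) + (k : Int))
  simp only [prefm]
  omega

theorem prefm_mono (X Y : List Int) (s : Nat) {k k' : Nat} (h : k ≤ k') :
    prefm X Y s k ≤ prefm X Y s k' := by
  obtain ⟨d, rfl⟩ := Nat.exists_eq_add_of_le h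
  induction d with
  | zero => simp
  | succ d ih =>
    have h2 := prefm_le_succ X Y s (k + d)
    have h3 : k + (d + 1) = (k + d) + 1 := by omega
    rw [h3]
    exact le_trans (ih (by omega)) h2

theorem countP_range_eq (p : Nat → Bool) (k l : Nat) (hl : l ≤ k)
    (hf : ∀ j, j < l → p j = false) (ht : ∀ j, l ≤ j → j < k → p j = true) :
    (List.range k).countP p = k - l := by
  induction k generalizing l with
  | zero => simp
  | succ k ih =>
    rw [List.range_succ, List.countP_append]
    by_cases h : l ≤ k
    · rw [ih l h hf (fun j h1 h2 => ht j h1 (by omega))]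
      have hk : p k = true := ht k h (by omega)
      simp [hk]
      omega
    · rw [ih k (le_refl k) (fun j hj => hf j (by omega)) (fun j h1 h2 => by omega)]
      have hk : p k = false := hf k (by omega)
      simp [hk]
      omega

theorem tailCnt_zero (X Y : List Int) (s : Nat) (D : Int) (L : Nat) :
    tailCnt X Y s D L 0 = diagSpec X Y s D L := by
  simp [tailCnt, diagSpec]

theorem tailCnt_succ (X Y : List Int) (s : Nat) (D : Int) (L r : Nat) (hr : r < L) :
    tailCnt X Y s D L r = (cntr X Y s D r : Int) + tailCnt X Y s D L (r+1) := by
  have h1 : L - r = (L - (r+1)) + 1 := by omega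
  have h2 : ((fun t => (cntr X Y s D (r + t) : Int)) ∘ Nat.succ)
      = fun t => (cntr X Y s D ((r + 1) + t) : Int) := by
    funext t
    simp only [Function.comp_apply]
    have h3 : r + Nat.succ t = (r + 1) + t := by omega
    rw [h3]
  unfold tailCnt
  rw [h1, List.range_succ_eq_map, List.map_cons, List.sum_cons, List.map_map, h2]
  norm_num

theorem whileA_spec (X Y : List Int) (D : Int) (hD : 0 ≤ D) (i L : Nat) (n : Int)
    (hn : n = (i : Int) + (L : Int)) :
    ∀ fuel (l r : Nat) (l2 r2 temp ans : Int) (flag : Bool),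
      l2 = (l : Int) + (i : Int) → r2 = (r : Int) + (i : Int) →
      (flag = true → l ≤ r ∧ r ≤ L) →
      (flag = false → 1 ≤ l ∧ l ≤ r + 1 ∧ r < L) →
      temp = (if flag then prefm X Y i r - prefm X Y i l
              else prefm X Y i (r+1) - prefm X Y i (l-1)) →
      (∀ k, k < l → ¬ (prefm X Y i (if flag then r else r+1) - prefm X Y i k ≤ D)) →
      3 * (L - r) + (L + 1 - l) + 1 ≤ fuel →
      whileA X Y n D fuel (l : Int) (r : Int) l2 r2 temp flag ans
        = ans + tailCnt X Y i D L r := by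
  intro fuel
  induction fuel with
  | zero => intro l r l2 r2 temp ans flag _ _ _ _ _ _ hfuel; omega
  | succ fuel ih =>
    intro l r l2 r2 temp ans flag hl2 hr2 hT hF htemp hmin hfuel
    rw [whileA]
    by_cases hrL : r < L
    · have hc : (r : Int) < n ∧ r2 < n := by
        subst hr2 hn; constructor <;> omega
      rw [if_pos hc]
      cases flag with
      | true =>
        obtain ⟨hlr, _⟩ := hT rfl
        simp only [if_pos] at htemp ⊢
        have hmatch : pvMatch X Y (r : Int) r2 = prefm X Y i (r+1) - prefm X Y i r := by
          subst hr2
          simp only [prefm]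
          rw [add_comm (i : Int) (r : Int)]
          ring
        have htemp' : temp + pvMatch X Y (r : Int) r2 = prefm X Y i (r+1) - prefm X Y i l := by
          rw [hmatch, htemp]; ring
        by_cases hD' : temp + pvMatch X Y (r : Int) r2 ≤ D
        · rw [if_pos hD']
          have hcast1 : (r : Int) + 1 = ((r + 1 : Nat) : Int) := by push_cast; ring
          rw [hcast1]
          have hcnt : cntr X Y i D r = (r + 1) - l := by
            apply countP_range_eq _ _ l (by omega)
            · intro j hj
              simp only [decide_eq_false_iff_not]
              have h1 := hmin j hj
              simp only [if_pos] at h1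
              have h2 := prefm_mono X Y i (show r ≤ r + 1 by omega)
              omega
            · intro j h1 h2
              simp only [decide_eq_true_eq]
              have h3 := prefm_mono X Y i h1
              rw [htemp'] at hD'
              omega
          rw [ih l (r+1) l2 (r2+1) _ _ true hl2 (by subst hr2; push_cast; ring)
            (fun _ => ⟨by omega, by omega⟩) (by simp)
            (by simp only [if_pos]; rw [htemp'])
            (by
              intro k hk
              simp only [if_pos]
              have h1 := hmin k hk
              simp only [if_pos] at h1
              have h2 := prefm_mono X Y i (show r ≤ r + 1 by omega)
              omega)
            (by omega)]
          rw [tailCnt_succ X Y i D L r hrL]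
          have hval : r2 - l2 + 1 = ((cntr X Y i D r : Nat) : Int) := by
            rw [hcnt]; omega
          rw [hval]; ring
        · rw [if_neg hD']
          have hcast1 : (l : Int) + 1 = ((l + 1 : Nat) : Int) := by push_cast; ring
          rw [hcast1]
          rw [ih (l+1) r (l2+1) r2 _ _ false (by subst hl2; push_cast; ring) hr2
            (by simp) (fun _ => ⟨by omega, by omega, hrL⟩)
            (by
              simp only [Bool.false_eq_true, if_false]
              have h4 : (l + 1) - 1 = l := by omega
              rw [h4, htemp'])
            (by
              intro k hk
              simp only [Bool.false_eq_true, if_false]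
              rcases Nat.lt_succ_iff_lt_or_eq.mp hk with h | h
              · have h1 := hmin k h
                simp only [if_pos] at h1
                have h2 := prefm_mono X Y i (show r ≤ r + 1 by omega)
                omega
              · subst h
                rw [htemp'] at hD'
                omega)
            (by omega)]
      | false =>
        obtain ⟨h1l, hlr1, hrL'⟩ := hF rfl
        simp only [Bool.false_eq_true, if_false] at htemp ⊢
        have hcastl : (l : Int) - 1 = ((l - 1 : Nat) : Int) := by omega
        have hcastl2 : l2 - 1 = (((l - 1 : Nat)) : Int) + (i : Int) := by
          subst hl2; omega
        have hl' : l = (l - 1) + 1 := by omega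
        have hmatch : prefm X Y i l
            = prefm X Y i (l-1) + pvMatch X Y (((l - 1 : Nat)) : Int) ((((l - 1 : Nat)) : Int) + (i : Int)) := by
          conv_lhs => rw [hl']
          simp only [prefm]
          rw [add_comm (((l - 1 : Nat)) : Int) (i : Int)]
        have hm2 : pvMatch X Y ((l : Int) - 1) (l2 - 1) = prefm X Y i l - prefm X Y i (l - 1) := by
          rw [hcastl, hcastl2, hmatch]; ring
        have htemp' : temp - pvMatch X Y ((l : Int) - 1) (l2 - 1)
            = prefm X Y i (r+1) - prefm X Y i l := by
          rw [hm2, htemp]; ring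
        by_cases hD' : temp - pvMatch X Y ((l : Int) - 1) (l2 - 1) ≤ D
        · rw [if_pos hD']
          have hcast1 : (r : Int) + 1 = ((r + 1 : Nat) : Int) := by push_cast; ring
          rw [hcast1]
          have hcnt : cntr X Y i D r = (r + 1) - l := by
            apply countP_range_eq _ _ l (by omega)
            · intro j hj
              simp only [decide_eq_false_iff_not]
              have h1 := hmin j hj
              simp only [Bool.false_eq_true, if_false] at h1
              omega
            · intro j h1 h2
              simp only [decide_eq_true_eq]
              have h3 := prefm_mono X Y i h1
              rw [htemp'] at hD'
              omega
          rw [ih l (r+1) l2 (r2+1) _ _ true hl2 (by subst hr2; push_cast; ring)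
            (fun _ => ⟨by omega, by omega⟩) (by simp)
            (by simp only [if_pos]; rw [htemp'])
            (by
              intro k hk
              simp only [if_pos]
              have h1 := hmin k hk
              simp only [Bool.false_eq_true, if_false] at h1
              omega)
            (by omega)]
          rw [tailCnt_succ X Y i D L r hrL]
          have hval : r2 - l2 + 1 = ((cntr X Y i D r : Nat) : Int) := by
            rw [hcnt]; omega
          rw [hval]; ring
        · rw [if_neg hD']
          have hllr : l ≤ r := by
            by_contra hcon
            have hl2' : l = r + 1 := by omega
            rw [htemp', hl2'] at hD'
            simp at hD'
            omega
          have hcast1 : (l : Int) + 1 = ((l + 1 : Nat) : Int) := by push_cast; ring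
          rw [hcast1]
          rw [ih (l+1) r (l2+1) r2 _ _ false (by subst hl2; push_cast; ring) hr2
            (by simp) (fun _ => ⟨by omega, by omega, hrL'⟩)
            (by
              simp only [Bool.false_eq_true, if_false]
              have h4 : (l + 1) - 1 = l := by omega
              rw [h4, htemp'])
            (by
              intro k hk
              simp only [Bool.false_eq_true, if_false]
              rcases Nat.lt_succ_iff_lt_or_eq.mp hk with h | h
              · have h1 := hmin k h
                simp only [Bool.false_eq_true, if_false] at h1
                omega
              · subst h
                rw [htemp'] at hD'
                omega)
            (by omega)]
    · have hc : ¬ ((r : Int) < n ∧ r2 < n) := by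
        subst hr2 hn
        intro ⟨h1, h2⟩
        omega
      rw [if_neg hc]
      have hflag : flag = true := by
        cases flag
        · exact absurd (hF rfl).2.2 hrL
        · rfl
      subst hflag
      have hrL2 : r = L := by have := (hT rfl).2; omega
      subst hrL2
      simp [tailCnt]

theorem pvPrefix_eq (X Y : List Int) (s L : Nat) :
    pvPrefix X Y (s : Int) (L : Int) = (List.range (L+1)).map (prefm X Y s) := by
  induction L with
  | zero =>
    simp only [pvPrefix, Nat.cast_zero]
    rw [PySem.List.pyRange_one_eq_nil (by omega)]
    simp [prefm]
  | succ L ih =>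
    unfold pvPrefix at ih ⊢
    have hc : ((L + 1 : Nat) : Int) = (L : Int) + 1 := by push_cast; ring
    rw [hc, PySem.List.pyRange_one_succ_right (by omega), List.foldl_append, ih]
    simp only [List.foldl_cons, List.foldl_nil]
    have hlast : PySem.List.pyGetD ((List.range (L+1)).map (prefm X Y s)) (-1) 0
        = prefm X Y s L := by
      rw [List.range_succ, List.map_append, List.map_cons, List.map_nil,
        PySem.List.pyGetD_neg_one_append_singleton]
    rw [hlast, List.range_succ (n := L + 1), List.map_append, List.map_cons, List.map_nil]
    simp [prefm]

theorem pvBisect_spec (X Y : List Int) (s Lb : Nat) (target : Int) :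
    ∀ fuel (lo hi : Int), 0 ≤ lo → lo ≤ hi → hi ≤ (Lb : Int) + 1 →
      (hi - lo).toNat < fuel →
      (∀ k : Nat, (k : Int) < lo → prefm X Y s k < target) →
      (∀ k : Nat, hi ≤ (k : Int) → k ≤ Lb → target ≤ prefm X Y s k) →
      ∃ res : Nat,
        pvBisect ((List.range (Lb+1)).map (prefm X Y s)) target fuel lo hi = (res : Int) ∧
        lo ≤ (res : Int) ∧ (res : Int) ≤ hi ∧
        (∀ k : Nat, k < res → prefm X Y s k < target) ∧
        (∀ k : Nat, res ≤ k → k ≤ Lb → target ≤ prefm X Y s k) := by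
  intro fuel
  induction fuel with
  | zero => intro lo hi _ _ _ hfuel _ _; omega
  | succ fuel ih =>
    intro lo hi hlo0 hlohi hhiL hfuel hlo hhi
    simp only [pvBisect]
    by_cases hc : lo < hi
    · rw [if_pos hc]
      have hb := PySem.Int.floordiv_two_mid_bounds (le_of_lt hc)
      set mid := PySem.Int.floordiv (lo + hi) 2 with hmid
      have hmidlt : mid < hi := by
        rw [hmid, PySem.Int.floordiv_lt_iff_lt_mul (by norm_num)]; omega
      have hmid0 : 0 ≤ mid := by omega
      have hget : PySem.List.pyGetD ((List.range (Lb+1)).map (prefm X Y s)) mid 0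
          = prefm X Y s mid.toNat := by
        rw [PySem.List.pyGetD_eq_getElem _ _ hmid0 (by simp; omega)]
        simp only [List.getElem_map, List.getElem_range]
      rw [hget]
      by_cases hv : prefm X Y s mid.toNat < target
      · rw [if_pos hv]
        obtain ⟨res, heq, h1, h2, h3, h4⟩ := ih (mid + 1) hi (by omega) (by omega) hhiL (by omega)
          (by
            intro k hk
            have hkm : k ≤ mid.toNat := by omega
            have := prefm_mono X Y s hkm
            omega)
          hhi
        exact ⟨res, heq, by omega, h2, h3, h4⟩
      · rw [if_neg hv]
        obtain ⟨res, heq, h1, h2, h3, h4⟩ := ih lo mid hlo0 (by omega) (by omega) (by omega) hlo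
          (by
            intro k hk hkL
            have hkm : mid.toNat ≤ k := by omega
            have := prefm_mono X Y s hkm
            omega)
        exact ⟨res, heq, h1, by omega, h3, h4⟩
    · rw [if_neg hc]
      refine ⟨lo.toNat, by omega, by omega, by omega, ?_, ?_⟩
      · intro k hk
        exact hlo k (by omega)
      · intro k hk hkL
        exact hhi k (by omega) hkL

set_option maxHeartbeats 1000000 in
theorem countDiag_eq (X Y : List Int) (D : Int) (hD : 0 ≤ D) (s L : Nat) (n : Int)
    (hn : n = (s : Int) + (L : Int)) :
    countDiag X Y D n (s : Int) = diagSpec X Y s D L := by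
  have hL : n - (s : Int) = ((L : Nat) : Int) := by omega
  simp only [countDiag]
  rw [hL, pvPrefix_eq]
  have hbody : ∀ (total : Int) (r : Int), r ∈ PySem.List.pyRange 0 ((L : Nat) : Int) 1 →
      total + ((r + 1) - pvBisect ((List.range (L+1)).map (prefm X Y s))
          (PySem.List.pyGetD ((List.range (L+1)).map (prefm X Y s)) (r + 1) 0 - D)
          (r + 2).toNat 0 (r + 1))
      = total + ((cntr X Y s D r.toNat : Nat) : Int) := by
    intro total r hr
    rw [PySem.List.mem_pyRange_one] at hr
    obtain ⟨hr0, hrL⟩ := hr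
    have hget : PySem.List.pyGetD ((List.range (L+1)).map (prefm X Y s)) (r + 1) 0
        = prefm X Y s (r.toNat + 1) := by
      rw [PySem.List.pyGetD_eq_getElem _ _ (by omega) (by simp; omega)]
      simp only [List.getElem_map, List.getElem_range]
      congr 1
      omega
    rw [hget]
    obtain ⟨res, heq, hres0, hreshi, hbelow, habove⟩ :=
      pvBisect_spec X Y s L (prefm X Y s (r.toNat + 1) - D) (r + 2).toNat 0 (r + 1)
        (by omega) (by omega) (by omega) (by omega)
        (by intro k hk; omega)
        (by
          intro k hk hkL
          have h1 : r.toNat + 1 ≤ k := by omega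
          have := prefm_mono X Y s h1
          omega)
    rw [heq]
    have hcnt : cntr X Y s D r.toNat = (r.toNat + 1) - res := by
      apply countP_range_eq _ _ res (by omega)
      · intro j hj
        simp only [decide_eq_false_iff_not]
        have := hbelow j hj
        omega
      · intro j h1 h2
        simp only [decide_eq_true_eq]
        have := habove j h1 (by omega)
        omega
    rw [hcnt]
    have : res ≤ r.toNat + 1 := by omega
    push_cast [this]
    omega
  rw [PySem.List.foldl_congr_mem _ _ (fun total r => total + ((cntr X Y s D r.toNat : Nat) : Int)) _ hbody]
  rw [PySem.List.foldl_add (PySem.List.pyRange 0 ((L : Nat) : Int) 1)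
    (fun r => ((cntr X Y s D r.toNat : Nat) : Int)) 0]
  rw [PySem.List.pyRange_zero_natCast, List.map_map]
  simp only [diagSpec, zero_add]
  apply congrArg List.sum
  apply List.map_congr_left
  intro k _
  simp [Function.comp_apply]

theorem countDiag_eq' (X Y : List Int) (D : Int) (hD : 0 ≤ D) (n i : Int)
    (h0 : 0 ≤ i) (hin : i ≤ n) :
    countDiag X Y D n i = diagSpec X Y i.toNat D (n - i).toNat := by
  have h1 : i = ((i.toNat : Nat) : Int) := by omega
  have h2 : n = ((i.toNat : Nat) : Int) + (((n - i).toNat : Nat) : Int) := by omega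
  calc countDiag X Y D n i = countDiag X Y D n ((i.toNat : Nat) : Int) := by rw [← h1]
    _ = diagSpec X Y i.toNat D (n - i).toNat :=
        countDiag_eq X Y D hD i.toNat (n - i).toNat n h2

theorem solve_alt_nil (B : List Int) (C D : Int) : solve_alt [] B C D = 0 := by
  simp [solve_alt, PySem.List.pyRange_one_eq_nil]

theorem solve_nil (B : List Int) (C D : Int) : solve [] B C D = 0 := by
  simp [solve, PySem.List.pyRange_one_eq_nil]

theorem whileA_init (X Y : List Int) (D : Int) (hD : 0 ≤ D) (n i : Int) (len : Nat)
    (hi0 : 0 ≤ i) (hin : i ≤ n) (hn : n = (len : Int)) (ans : Int) :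
    whileA X Y n D (4 * len + 4) 0 0 i i 0 true ans
      = ans + diagSpec X Y i.toNat D (n - i).toNat := by
  have h1 : n = ((i.toNat : Nat) : Int) + (((n - i).toNat : Nat) : Int) := by omega
  have h2 : i = ((0 : Nat) : Int) + ((i.toNat : Nat) : Int) := by omega
  have h3 : ((0 : Nat) : Int) = (0 : Int) := by norm_num
  have h := whileA_spec X Y D hD i.toNat (n - i).toNat n h1 (4 * len + 4) 0 0 i i 0 ans true
    (by omega) (by omega) (fun _ => ⟨le_refl 0, by omega⟩) (by simp)
    (by simp [prefm]) (by intro k hk; omega) (by omega)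
  rw [h3] at h
  rw [h, tailCnt_zero]

-- ===== VERDICT (by name: the statement is the Claim_ definition above) =====
theorem solve_spec : Claim_equal_solve := by
  intro A B C D _ hpre
  obtain ⟨hlen, hD⟩ := hpre
  unfold Spec_solve
  rcases hD with hD | hnil
  · simp only [solve, solve_alt]
    have key1 : ∀ (ans : Int) (i : Int), i ∈ PySem.List.pyRange 0 ((A.length : Nat) : Int) 1 →
        whileA A (B.map (fun i => C - i)) ((A.length : Nat) : Int) D (4 * A.length + 4) 0 0 i i 0 true ans
          = ans + countDiag A (B.map (fun i => C - i)) D ((A.length : Nat) : Int) i := by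
      intro ans i hi
      rw [PySem.List.mem_pyRange_one] at hi
      rw [whileA_init _ _ D hD _ i A.length hi.1 (by omega) rfl]
      rw [countDiag_eq' _ _ D hD _ i hi.1 (by omega)]
    have key2 : ∀ (ans : Int) (i : Int), i ∈ PySem.List.pyRange 1 ((A.length : Nat) : Int) 1 →
        whileA (B.map (fun i => C - i)) A ((A.length : Nat) : Int) D (4 * A.length + 4) 0 0 i i 0 true ans
          = ans + countDiag (B.map (fun i => C - i)) A D ((A.length : Nat) : Int) i := by
      intro ans i hi
      rw [PySem.List.mem_pyRange_one] at hi
      rw [whileA_init _ _ D hD _ i A.length (by omega) (by omega) rfl]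
      rw [countDiag_eq' _ _ D hD _ i (by omega) (by omega)]
    rw [PySem.List.foldl_congr_mem _ _
      (fun ans i => ans + countDiag A (B.map (fun i => C - i)) D ((A.length : Nat) : Int) i) _ key1]
    rw [PySem.List.foldl_congr_mem _ _
      (fun ans i => ans + countDiag (B.map (fun i => C - i)) A D ((A.length : Nat) : Int) i) _ key2]
  · subst hnil
    rw [solve_nil, solve_alt_nil]
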